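-- pv_equiv track=rewrite | github.com/arkanmgerges/cafm.project | src/port_adapter/messaging/listener/common/handler/lookup/bulk/ProcessBulkHandler.py | _batchSimilar
-- ===== SOURCE A (Python) =====
-- def _batchSimilar(data):
--     # The key will be the command like 'create_unit' and the value is the details of the command
--     result = {}
--     for item in data:
--         command = item["_request_data"]["command"]
--         if command not in result:
--             result[command] = []
--         result[command].append(item)
--     return result
-- ===== SOURCE B (Python) =====
-- def _batchSimilar(data):
--     # Two passes: collect the distinct commands in first-occurrence order,
--     # then build each group with one filtering comprehension per command.
--     commands = list(dict.fromkeys(item["_request_data"]["command"] for item in data))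
--     return {c: [item for item in data if item["_request_data"]["command"] == c]
--             for c in commands}
-- ===== Notes on version B (the rewrite author's own statement) =====
-- stated objective: alternative
-- what changed: A builds the groups in one pass by appending into a dict; B first deduplicates the command keys in first-occurrence order and then materialises each group with a per-command filtering comprehension over the data.
import Mathlib
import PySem

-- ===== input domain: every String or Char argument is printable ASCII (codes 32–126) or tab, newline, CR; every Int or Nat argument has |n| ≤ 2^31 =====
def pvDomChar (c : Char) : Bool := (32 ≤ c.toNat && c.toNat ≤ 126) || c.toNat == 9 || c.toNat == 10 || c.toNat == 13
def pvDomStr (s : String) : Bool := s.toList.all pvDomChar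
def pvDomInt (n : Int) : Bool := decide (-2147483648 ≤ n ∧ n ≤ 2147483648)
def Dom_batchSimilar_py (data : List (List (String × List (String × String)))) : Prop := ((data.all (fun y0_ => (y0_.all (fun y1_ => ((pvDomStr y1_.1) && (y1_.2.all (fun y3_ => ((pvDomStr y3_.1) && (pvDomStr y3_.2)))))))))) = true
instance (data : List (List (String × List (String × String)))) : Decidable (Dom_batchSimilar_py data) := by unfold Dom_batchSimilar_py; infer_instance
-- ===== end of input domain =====

-- B replaces A's single dict-appending pass by "dedup the commands, then one filter per command";
-- same return value (including key and group order), an alternative decomposition, not faster.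


-- ===== PORT A =====
-- item["_request_data"]["command"]: none exactly where Python raises KeyError (both programs
-- evaluate this same expression on every item).
def getCmd? (item : List (String × List (String × String))) : Option String :=
  match PySem.Dict.get? ⟨item⟩ "_request_data" with
  | none => none
  | some rd => PySem.Dict.get? (⟨rd⟩ : PySem.Dict String String) "command"

def batchSimilar_py (data : List (List (String × List (String × String)))) : List (String × List (List (String × List (String × String)))) :=
  (data.foldl (fun (result : PySem.Dict String (List (List (String × List (String × String))))) item =>
    match getCmd? item with
    | none => result          -- Python raises KeyError here; excluded by Pre_
    | some command =>
      -- if command not in result: result[command] = []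
      let result1 := if result.contains command then result else result.insert command []
      -- result[command].append(item)
      result1.insert command (result1.getD command [] ++ [item]))
    PySem.Dict.empty).items

-- ===== PORT B =====
def batchSimilar_py_alt (data : List (List (String × List (String × String)))) : List (String × List (List (String × List (String × String)))) :=
  let commands := PySem.List.dedup (data.filterMap getCmd?)   -- dict.fromkeys(...)
  commands.map (fun c => (c, data.filter (fun item => getCmd? item == some c)))

-- ===== PRECONDITION & SPEC =====
-- Pre_ excludes exactly the inputs where some item lacks "_request_data" or its "command":
-- there Python A (and B) raises KeyError.
def Pre_batchSimilar_py (data : List (List (String × List (String × String)))) : Prop :=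
  (data.all (fun item => (getCmd? item).isSome)) = true
instance (data : List (List (String × List (String × String)))) : Decidable (Pre_batchSimilar_py data) := by unfold Pre_batchSimilar_py; infer_instance

def pvWitness_batchSimilar_py : (List (List (String × List (String × String)))) :=
  [[("_request_data", [("command", "create_unit")])],
   [("_request_data", [("command", "create_unit")]), ("x", [])]]

def Spec_batchSimilar_py (data : List (List (String × List (String × String)))) (out : List (String × List (List (String × List (String × String))))) : Prop := out = batchSimilar_py_alt data
instance (data : List (List (String × List (String × String)))) (out : List (String × List (List (String × List (String × String))))) : Decidable (Spec_batchSimilar_py data out) := by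
  unfold Spec_batchSimilar_py
  exact @List.hasDecEq _ (fun x y => by infer_instance) out (batchSimilar_py_alt data)

-- ===== CLAIM (what is proved, stated in full; the proofs are below) =====
def Claim_equal_batchSimilar_py : Prop := ∀ (data : List (List (String × List (String × String)))), Dom_batchSimilar_py data → Pre_batchSimilar_py data → Spec_batchSimilar_py data (batchSimilar_py data)

-- ===== LEMMAS AND PROOFS =====

-- the (command, item) pairs A actually processes
def pvPairs (data : List (List (String × List (String × String)))) : List (String × List (String × List (String × String))) :=
  data.filterMap (fun item => (getCmd? item).map (fun c => (c, item)))

-- A's loop body is d.modify c [] (· ++ [item])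
theorem pvStep_eq (r : PySem.Dict String (List (List (String × List (String × String)))))
    (c : String) (it : List (String × List (String × String))) :
    (let r1 := if r.contains c then r else r.insert c []
     r1.insert c (r1.getD c [] ++ [it])) = r.modify c [] (· ++ [it]) := by
  by_cases h : r.contains c = true
  · simp [h, PySem.Dict.modify]
  · have h' : r.contains c = false := by simpa using h
    simp [h', PySem.Dict.modify, PySem.Dict.getD_insert_self, PySem.Dict.insert_insert_self,
      PySem.Dict.getD_of_not_contains r ([] : List (List (String × List (String × String)))) h']

theorem pvFold_eq (data : List (List (String × List (String × String))))
    (d : PySem.Dict String (List (List (String × List (String × String))))) :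
    data.foldl (fun result item =>
      match getCmd? item with
      | none => result
      | some command =>
        let result1 := if result.contains command then result else result.insert command []
        result1.insert command (result1.getD command [] ++ [item])) d
    = (pvPairs data).foldl (fun d p => d.modify p.1 [] (· ++ [p.2])) d := by
  induction data generalizing d with
  | nil => rfl
  | cons it rest ih =>
    cases h : getCmd? it with
    | none => simp [pvPairs, h, ih]
    | some c =>
      simp only [pvPairs, List.filterMap_cons, h, Option.map_some, List.foldl_cons]
      rw [← pvPairs, ← ih, pvStep_eq]

theorem pvPairs_fst (data : List (List (String × List (String × String)))) :
    (pvPairs data).map (·.1) = data.filterMap getCmd? := by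
  induction data with
  | nil => rfl
  | cons it rest ih =>
    cases h : getCmd? it <;> simp [pvPairs, h] at ih ⊢ <;> exact ih

theorem pvPairs_group (data : List (List (String × List (String × String)))) (c : String) :
    ((pvPairs data).filter (fun p => p.1 == c)).map (·.2)
      = data.filter (fun item => getCmd? item == some c) := by
  induction data with
  | nil => rfl
  | cons it rest ih =>
    cases h : getCmd? it with
    | none => simpa [pvPairs, List.filterMap_cons, h] using ih
    | some c' =>
      by_cases hc : c' = c <;>
        simp [pvPairs, h, hc] at ih ⊢ <;> exact ih

theorem batchSimilar_py_spec : Claim_equal_batchSimilar_py := by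
  intro data _ _
  show batchSimilar_py data = batchSimilar_py_alt data
  unfold batchSimilar_py
  rw [pvFold_eq]
  have hkeys : ((pvPairs data).foldl (fun d p => d.modify p.1 [] (· ++ [p.2]))
      PySem.Dict.empty).keys = PySem.Set.ofList ((pvPairs data).map (·.1)) := by
    rw [PySem.Dict.keys_foldl_modify_key (pvPairs data) (·.1) [] (fun _ p => (· ++ [p.2]))]
    simp [PySem.Set.update, PySem.Set.ofList_eq_foldl]
  rw [PySem.Dict.items_eq_map_keys _ (by rw [hkeys]; exact PySem.Set.nodup_ofList _) []]
  rw [hkeys, pvPairs_fst]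
  unfold batchSimilar_py_alt
  rw [PySem.List.dedup_eq_ofList]
  refine List.map_congr_left (fun c _ => ?_)
  rw [PySem.Dict.getD_foldl_modify_append, PySem.Dict.getD_empty, List.nil_append, pvPairs_group]
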